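-- pv_equiv track=rewrite | github.com/hemanta-sfsu/CSC666-02-Lexicon-Sentiment-Analysis | project-code/new_heuristics.py | handle_capital
-- ===== SOURCE A (Python) =====
-- def handle_capital(words):
--     """
--     Check whether just some words in the input are ALL CAPS
--     :param list words: The words to inspect
--     :returns: `True` if some but not all items in `words` are ALL CAPS
--     """
--     is_different = False
--     allcap_words = 0
--     for word in words:
--         if word.isupper():
--             allcap_words += 1
--     cap_differential = len(words) - allcap_words
--     if 0 < cap_differential < len(words):
--         is_different = True
--     return is_different
-- ===== SOURCE B (Python) =====
-- def handle_capital(words):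
--     """
--     Check whether just some words in the input are ALL CAPS
--     :param list words: The words to inspect
--     :returns: `True` if some but not all items in `words` are ALL CAPS
--     """
--     return any(w.isupper() for w in words) and any(not w.isupper() for w in words)
-- ===== Notes on version B (the rewrite author's own statement) =====
-- stated objective: idiomatic
-- what changed: Replaced the counting loop plus arithmetic comparison (len(words) - allcap_words strictly between 0 and len) by the conjunction of two short-circuiting existence checks: at least one all-caps word and at least one non-all-caps word.
import Mathlib
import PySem

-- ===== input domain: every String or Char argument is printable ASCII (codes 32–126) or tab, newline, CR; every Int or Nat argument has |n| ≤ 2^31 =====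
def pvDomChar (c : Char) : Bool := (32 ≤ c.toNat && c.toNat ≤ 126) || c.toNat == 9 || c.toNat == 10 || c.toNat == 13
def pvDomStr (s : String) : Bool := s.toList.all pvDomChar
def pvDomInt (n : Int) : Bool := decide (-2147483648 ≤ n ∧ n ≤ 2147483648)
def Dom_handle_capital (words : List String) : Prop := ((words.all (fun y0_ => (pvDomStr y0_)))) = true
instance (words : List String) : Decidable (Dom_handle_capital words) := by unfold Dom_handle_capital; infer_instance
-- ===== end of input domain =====

-- B replaces the counting loop by two short-circuit existence checks (idiomatic decomposition).

-- str.isupper() ported by hand (exact on the printable-ASCII domain: cased chars are the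
-- ASCII letters, so isupper = some letter present and no lowercase letter present)
def pyStrIsupper (s : String) : Bool :=
  s.toList.any PySem.Chars.isalpha && s.toList.all (fun c => !PySem.Chars.islower c)

-- ===== PORT A =====
def handle_capital (words : List String) : Bool :=
  let is_different := false
  let allcap_words : Int :=
    words.foldl (fun acc word => if pyStrIsupper word then acc + 1 else acc) 0
  let cap_differential : Int := (words.length : Int) - allcap_words
  let is_different :=
    if 0 < cap_differential ∧ cap_differential < (words.length : Int) then true
    else is_different
  is_different

-- ===== PORT B =====
def handle_capital_alt (words : List String) : Bool :=
  words.any (fun w => pyStrIsupper w) && words.any (fun w => !pyStrIsupper w)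

-- ===== PRECONDITION & SPEC =====
def Spec_handle_capital (words : List String) (out : Bool) : Prop := out = handle_capital_alt words
instance (words : List String) (out : Bool) : Decidable (Spec_handle_capital words out) := by unfold Spec_handle_capital; infer_instance

-- ===== CLAIM (what is proved, stated in full; the proofs are below) =====
def Claim_equal_handle_capital : Prop := ∀ (words : List String), Dom_handle_capital words → Spec_handle_capital words (handle_capital words)

-- ===== LEMMAS AND PROOFS =====

-- the count A maintains equals the length of the filtered list
theorem count_eq_filter_length (words : List String) :
    words.foldl (fun acc word => if pyStrIsupper word then acc + 1 else acc) (0 : Int)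
      = ((words.filter (fun w => pyStrIsupper w)).length : Int) := by
  have h : ∀ (l : List String) (a : Int),
      l.foldl (fun acc word => if pyStrIsupper word then acc + 1 else acc) a
        = a + ((l.filter (fun w => pyStrIsupper w)).length : Int) := by
    intro l
    induction l with
    | nil => intro a; simp [List.foldl]
    | cons x xs ih =>
        intro a
        by_cases hx : pyStrIsupper x = true <;>
          simp [List.foldl, List.filter, hx, ih] <;> ring
  simpa using h words 0

-- ===== VERDICT (by name: the statement is the Claim_ definition above) =====
theorem handle_capital_spec : Claim_equal_handle_capital := by
  intro words _
  unfold Spec_handle_capital handle_capital handle_capital_alt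
  simp only [count_eq_filter_length]
  rcases h : (words.any fun w => pyStrIsupper w) with _ | _ <;>
  rcases h2 : (words.any fun w => !pyStrIsupper w) with _ | _ <;>
  simp_all [List.any_eq_true, List.length_filter_lt_length_iff_exists]
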